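-- pv_equiv track=rewrite | github.com/jfxberns/epic-db | scripts/extract_profiles.py | compute_relationship_counts
-- ===== SOURCE A (Python) =====
-- def compute_relationship_counts(relationships, user_tables):
--     """Count incoming and outgoing relationships per table.
--
--     Returns: dict of {table_name: {"in": N, "out": N}}
--     """
--     counts = {t: {"in": 0, "out": 0} for t in user_tables}
--
--     for rel in relationships:
--         src = rel["source_table"]
--         ref = rel["ref_table"]
--
--         if src in counts:
--             counts[src]["out"] += 1
--         if ref in counts:
--             counts[ref]["in"] += 1
--
--     return counts
-- ===== SOURCE B (Python) =====
-- def compute_relationship_counts(relationships, user_tables):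
--     """Count incoming and outgoing relationships per table.
--
--     Project the source and ref columns once, then count per table with
--     list.count — no running counter state is maintained at all.
--     """
--     sources = [rel["source_table"] for rel in relationships]
--     refs = [rel["ref_table"] for rel in relationships]
--     return {t: {"in": refs.count(t), "out": sources.count(t)} for t in user_tables}
-- ===== Notes on version B (the rewrite author's own statement) =====
-- stated objective: simpler
-- what changed: A maintains a pre-initialized nested counter dict and mutates it with membership-guarded increments in one pass over relationships; B keeps no counter state at all: it projects the source and ref columns and builds the result directly, counting each table's occurrences with list.count (per-table scans instead of a stateful tally pass).
import Mathlib
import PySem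

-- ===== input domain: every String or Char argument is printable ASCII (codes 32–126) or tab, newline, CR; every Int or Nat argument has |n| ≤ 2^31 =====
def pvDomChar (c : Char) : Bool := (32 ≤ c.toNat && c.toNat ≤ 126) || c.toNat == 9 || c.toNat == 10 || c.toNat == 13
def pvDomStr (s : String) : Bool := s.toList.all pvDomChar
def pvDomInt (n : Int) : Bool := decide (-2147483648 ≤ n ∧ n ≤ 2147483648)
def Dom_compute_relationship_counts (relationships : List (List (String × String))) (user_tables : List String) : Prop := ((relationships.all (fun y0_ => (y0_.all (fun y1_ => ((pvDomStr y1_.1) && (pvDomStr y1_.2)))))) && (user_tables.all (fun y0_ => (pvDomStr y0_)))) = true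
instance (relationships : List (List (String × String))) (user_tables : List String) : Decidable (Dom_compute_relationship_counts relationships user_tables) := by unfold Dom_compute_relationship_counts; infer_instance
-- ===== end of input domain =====

-- B replaces A's stateful pass (pre-initialized nested dict, membership-guarded increments)
-- by column projections and per-table list.count scans (simpler; same return value, costlier in r*t).


-- ===== PORT A =====
-- 'if x in counts: counts[x][fld] += 1'. The '+= 1' is ported as Dict.modify with default 0:
-- exact, since the inner dict is always built as {"in": 0, "out": 0} and carries both keys.
def pvBump (d : PySem.Dict String (PySem.Dict String Int)) (k : String) (fld : String) :
    PySem.Dict String (PySem.Dict String Int) :=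
  if d.contains k then d.modify k PySem.Dict.empty (fun inner => inner.modify fld 0 (· + 1)) else d

-- one iteration of A's loop; rel["source_table"] / rel["ref_table"] are first-match lookups,
-- and a missing key (Python KeyError) is excluded by Pre_ (the port then leaves the state unchanged).
def pvStepA (d : PySem.Dict String (PySem.Dict String Int)) (rel : List (String × String)) :
    PySem.Dict String (PySem.Dict String Int) :=
  match (PySem.Dict.mk rel).get? "source_table", (PySem.Dict.mk rel).get? "ref_table" with
  | some src, some ref => pvBump (pvBump d src "out") ref "in"
  | _, _ => d  -- KeyError: outside Pre_

def compute_relationship_counts (relationships : List (List (String × String))) (user_tables : List String) : List (String × List (String × Int)) :=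
  let counts0 : PySem.Dict String (PySem.Dict String Int) :=
    user_tables.foldl (fun d t => d.insert t (PySem.Dict.ofList [("in", 0), ("out", 0)])) PySem.Dict.empty
  let counts := relationships.foldl pvStepA counts0
  counts.items.map (fun p => (p.1, p.2.items))

-- ===== PORT B =====
-- rel["source_table"] / rel["ref_table"]; missing keys (KeyError in Python) are ported
-- as default "" and excluded by Pre_.
def pvSrcOf (rel : List (String × String)) : String := (PySem.Dict.mk rel).getD "source_table" ""
def pvRefOf (rel : List (String × String)) : String := (PySem.Dict.mk rel).getD "ref_table" ""

def compute_relationship_counts_alt (relationships : List (List (String × String))) (user_tables : List String) : List (String × List (String × Int)) :=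
  let sources := relationships.map pvSrcOf
  let refs := relationships.map pvRefOf
  let res := user_tables.foldl
    (fun d t => d.insert t (PySem.Dict.ofList
      [("in", PySem.List.count refs t), ("out", PySem.List.count sources t)]))
    (PySem.Dict.empty : PySem.Dict String (PySem.Dict String Int))
  res.items.map (fun p => (p.1, p.2.items))

-- ===== PRECONDITION & SPEC =====
-- Pre_ excludes exactly the inputs where Python A raises KeyError: a relationship dict
-- missing the key "source_table" or "ref_table".
def Pre_compute_relationship_counts (relationships : List (List (String × String))) (user_tables : List String) : Prop :=
  ∀ rel ∈ relationships, "source_table" ∈ rel.map Prod.fst ∧ "ref_table" ∈ rel.map Prod.fst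
instance (relationships : List (List (String × String))) (user_tables : List String) : Decidable (Pre_compute_relationship_counts relationships user_tables) := by unfold Pre_compute_relationship_counts; infer_instance
def pvWitness_compute_relationship_counts : (List (List (String × String))) × List String :=
  ([[("source_table", "a"), ("ref_table", "b")]], ["a", "b"])

def Spec_compute_relationship_counts (relationships : List (List (String × String))) (user_tables : List String) (out : List (String × List (String × Int))) : Prop := out = compute_relationship_counts_alt relationships user_tables
instance (relationships : List (List (String × String))) (user_tables : List String) (out : List (String × List (String × Int))) : Decidable (Spec_compute_relationship_counts relationships user_tables out) := by unfold Spec_compute_relationship_counts; infer_instance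

-- ===== CLAIM (what is proved, stated in full; the proofs are below) =====
def Claim_equal_compute_relationship_counts : Prop := ∀ (relationships : List (List (String × String))) (user_tables : List String), Dom_compute_relationship_counts relationships user_tables → Pre_compute_relationship_counts relationships user_tables → Spec_compute_relationship_counts relationships user_tables (compute_relationship_counts relationships user_tables)

-- ===== LEMMAS AND PROOFS =====

-- a fold of inserts whose value depends only on the key: pointwise description
lemma pv_getD_build {ν : Type} (uts : List String) (f : String → ν) (d : PySem.Dict String ν) (k : String) (d0 : ν) :
    (uts.foldl (fun d t => d.insert t (f t)) d).getD k d0 = if k ∈ uts then f k else d.getD k d0 := by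
  induction uts generalizing d with
  | nil => simp
  | cons t ts ih =>
    simp only [List.foldl_cons, ih, PySem.Dict.getD_insert, List.mem_cons]
    by_cases h1 : k ∈ ts <;> by_cases h2 : k = t <;> simp [h1, h2]

lemma pv_keys_build {ν : Type} (uts : List String) (f : String → ν) :
    (uts.foldl (fun d t => d.insert t (f t)) (PySem.Dict.empty : PySem.Dict String ν)).keys
      = PySem.Set.ofList uts := by
  have h := PySem.Dict.keys_foldl_insert uts (fun _ t => f t) (PySem.Dict.empty : PySem.Dict String ν)
  simpa [PySem.Dict.keys_empty, PySem.Set.update_nil_left] using h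

-- the two inner-dict increments, computed on the literal {"in": a, "out": b}
lemma pv_modify_out (a b : Int) :
    (PySem.Dict.ofList [("in", a), ("out", b)]).modify "out" 0 (· + 1)
      = PySem.Dict.ofList [("in", a), ("out", b + 1)] := rfl

lemma pv_modify_in (a b : Int) :
    (PySem.Dict.ofList [("in", a), ("out", b)]).modify "in" 0 (· + 1)
      = PySem.Dict.ofList [("in", a + 1), ("out", b)] := rfl

lemma pv_bump_keys (d : PySem.Dict String (PySem.Dict String Int)) (k fld : String) :
    (pvBump d k fld).keys = d.keys := by
  unfold pvBump
  split_ifs with h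
  · rw [PySem.Dict.keys_modify, PySem.Dict.keys_insert_of_contains]
    exact h
  · rfl

lemma pv_bump_getD (uts : List String) (d : PySem.Dict String (PySem.Dict String Int))
    (k fld : String) (hk : d.keys = PySem.Set.ofList uts) (x : String) (hx : x ∈ uts) :
    (pvBump d k fld).getD x PySem.Dict.empty
      = if x = k then (d.getD k PySem.Dict.empty).modify fld 0 (· + 1)
        else d.getD x PySem.Dict.empty := by
  have hcont : ∀ y, d.contains y = decide (y ∈ uts) := by
    intro y
    rw [PySem.Dict.contains_eq_decide_mem_keys, hk]
    simp [PySem.Set.mem_ofList]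
  unfold pvBump
  by_cases hxk : x = k
  · subst hxk
    rw [hcont x, decide_eq_true hx]
    simp
  · split_ifs with h
    · rw [PySem.Dict.getD_modify]
      simp only [if_neg hxk]
    · rfl

lemma pv_stepA_keys (d : PySem.Dict String (PySem.Dict String Int)) (rel : List (String × String)) :
    (pvStepA d rel).keys = d.keys := by
  unfold pvStepA
  cases (PySem.Dict.mk rel).get? "source_table" with
  | none => rfl
  | some s =>
    cases (PySem.Dict.mk rel).get? "ref_table" with
    | none => rfl
    | some r => simp [pv_bump_keys]

-- invariant of A's loop: for every user table t, the inner dict stays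
-- {"in": start + refs-so-far, "out": start + sources-so-far}
lemma pv_A_loop (uts : List String) (rels : List (List (String × String)))
    (hpre : ∀ rel ∈ rels, "source_table" ∈ rel.map Prod.fst ∧ "ref_table" ∈ rel.map Prod.fst)
    (d : PySem.Dict String (PySem.Dict String Int)) (g : String → Int × Int)
    (hk : d.keys = PySem.Set.ofList uts)
    (hg : ∀ x ∈ uts, d.getD x PySem.Dict.empty
            = PySem.Dict.ofList [("in", (g x).1), ("out", (g x).2)]) :
    ∀ t ∈ uts, (rels.foldl pvStepA d).getD t PySem.Dict.empty
      = PySem.Dict.ofList [("in", (g t).1 + ((rels.map pvRefOf).count t : Int)),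
                           ("out", (g t).2 + ((rels.map pvSrcOf).count t : Int))] := by
  induction rels generalizing d g with
  | nil =>
    intro t ht
    simpa using hg t ht
  | cons rel rest ih =>
    intro t ht
    obtain ⟨hs', hr'⟩ := hpre rel (List.mem_cons_self ..)
    have hsome_s : ∃ s, (PySem.Dict.mk rel).get? "source_table" = some s := by
      cases h : (PySem.Dict.mk rel).get? "source_table" with
      | none =>
        rw [PySem.Dict.get?_eq_none_iff_not_mem_keys] at h
        rw [PySem.Dict.keys_mk] at h
        exact absurd hs' h
      | some s => exact ⟨s, rfl⟩
    have hsome_r : ∃ r, (PySem.Dict.mk rel).get? "ref_table" = some r := by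
      cases h : (PySem.Dict.mk rel).get? "ref_table" with
      | none =>
        rw [PySem.Dict.get?_eq_none_iff_not_mem_keys] at h
        rw [PySem.Dict.keys_mk] at h
        exact absurd hr' h
      | some r => exact ⟨r, rfl⟩
    obtain ⟨s, hs⟩ := hsome_s
    obtain ⟨r, hr⟩ := hsome_r
    have hsrc : pvSrcOf rel = s := by
      simp [pvSrcOf, PySem.Dict.getD_eq_get?_getD, hs]
    have href : pvRefOf rel = r := by
      simp [pvRefOf, PySem.Dict.getD_eq_get?_getD, hr]
    have hstep : pvStepA d rel = pvBump (pvBump d s "out") r "in" := by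
      unfold pvStepA
      rw [hs, hr]
    have hk1 : (pvBump d s "out").keys = PySem.Set.ofList uts := by
      rw [pv_bump_keys]; exact hk
    have hk2 : (pvStepA d rel).keys = PySem.Set.ofList uts := by
      rw [pv_stepA_keys]; exact hk
    have hg2 : ∀ x ∈ uts, (pvStepA d rel).getD x PySem.Dict.empty
        = PySem.Dict.ofList
            [("in", (g x).1 + (if x = r then 1 else 0)),
             ("out", (g x).2 + (if x = s then 1 else 0))] := by
      intro x hx
      rw [hstep, pv_bump_getD uts _ r "in" hk1 x hx]
      by_cases hxr : x = r
      · rw [if_pos hxr]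
        have hru : r ∈ uts := hxr ▸ hx
        rw [pv_bump_getD uts d s "out" hk r hru]
        by_cases hrs : r = s
        · have hsu : s ∈ uts := hrs ▸ hru
          rw [if_pos hrs, hg s hsu, pv_modify_out, pv_modify_in]
          have hxs : x = s := hxr.trans hrs
          simp [hxr, hrs]
        · have hxs : ¬ x = s := fun h => hrs (hxr.symm.trans h)
          rw [if_neg hrs, hg r hru, pv_modify_in]
          simp [hxr, hrs]
      · rw [if_neg hxr, pv_bump_getD uts d s "out" hk x hx]
        by_cases hxs : x = s
        · have hsu : s ∈ uts := hxs ▸ hx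
          rw [if_pos hxs, hg s hsu, pv_modify_out]
          have hsr : ¬ s = r := fun h => hxr (hxs.trans h)
          simp [hxs, hsr]
        · rw [if_neg hxs, hg x hx]
          simp [hxr, hxs]
    have hrest : ∀ rel' ∈ rest, "source_table" ∈ rel'.map Prod.fst ∧ "ref_table" ∈ rel'.map Prod.fst :=
      fun rel' h' => hpre rel' (List.mem_cons_of_mem _ h')
    have := ih hrest (pvStepA d rel)
      (fun x => ((g x).1 + (if x = r then 1 else 0), (g x).2 + (if x = s then 1 else 0)))
      hk2 hg2 t ht
    rw [List.foldl_cons, this]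
    have e1 : (g t).1 + (if t = r then (1 : Int) else 0) + ((rest.map pvRefOf).count t : Int)
        = (g t).1 + (((rel :: rest).map pvRefOf).count t : Int) := by
      simp only [List.map_cons, List.count_cons, href, beq_iff_eq]
      by_cases h : t = r
      · subst h
        simp only [if_true]
        push_cast
        ring
      · have h' : ¬ r = t := fun hh => h hh.symm
        simp [h, h']
    have e2 : (g t).2 + (if t = s then (1 : Int) else 0) + ((rest.map pvSrcOf).count t : Int)
        = (g t).2 + (((rel :: rest).map pvSrcOf).count t : Int) := by
      simp only [List.map_cons, List.count_cons, hsrc, beq_iff_eq]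
      by_cases h : t = s
      · subst h
        simp only [if_true]
        push_cast
        ring
      · have h' : ¬ s = t := fun hh => h hh.symm
        simp [h, h']
    rw [← e1, ← e2]

-- two dicts with the same keys (the distinct user tables) and pointwise equal inner dicts
-- serialize to the same output
lemma pv_out_eq (dA dB : PySem.Dict String (PySem.Dict String Int)) (uts : List String)
    (hA : dA.keys = PySem.Set.ofList uts) (hB : dB.keys = PySem.Set.ofList uts)
    (h : ∀ t ∈ uts, dA.getD t PySem.Dict.empty = dB.getD t PySem.Dict.empty) :
    dA.items.map (fun p => (p.1, p.2.items)) = dB.items.map (fun p => (p.1, p.2.items)) := by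
  have hndA : dA.keys.Nodup := by rw [hA]; exact PySem.Set.nodup_ofList uts
  have hndB : dB.keys.Nodup := by rw [hB]; exact PySem.Set.nodup_ofList uts
  rw [PySem.Dict.items_eq_map_keys dA hndA PySem.Dict.empty,
      PySem.Dict.items_eq_map_keys dB hndB PySem.Dict.empty, hA, hB, List.map_map, List.map_map]
  refine List.map_congr_left ?_
  intro t ht
  simp [Function.comp, h t ((PySem.Set.mem_ofList uts t).mp ht)]

-- ===== VERDICT (by name: the statement is the Claim_ definition above) =====
theorem compute_relationship_counts_spec : Claim_equal_compute_relationship_counts := by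
  intro rels uts _ hpre
  unfold Spec_compute_relationship_counts
  unfold compute_relationship_counts compute_relationship_counts_alt
  simp only []
  have hkA : (rels.foldl pvStepA
      (uts.foldl (fun d t => d.insert t (PySem.Dict.ofList [("in", 0), ("out", 0)])) PySem.Dict.empty)).keys
      = PySem.Set.ofList uts := by
    have : ∀ (l : List (List (String × String))) (d : PySem.Dict String (PySem.Dict String Int)),
        (l.foldl pvStepA d).keys = d.keys := by
      intro l
      induction l with
      | nil => intro d; rfl
      | cons a l ih => intro d; rw [List.foldl_cons, ih, pv_stepA_keys]
    rw [this, pv_keys_build]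
  have hkB : (uts.foldl
      (fun d t => d.insert t (PySem.Dict.ofList
        [("in", PySem.List.count (rels.map pvRefOf) t), ("out", PySem.List.count (rels.map pvSrcOf) t)]))
      (PySem.Dict.empty : PySem.Dict String (PySem.Dict String Int))).keys = PySem.Set.ofList uts := pv_keys_build uts _
  refine pv_out_eq _ _ uts hkA hkB ?_
  intro t ht
  have hA := pv_A_loop uts rels hpre
    (uts.foldl (fun d t => d.insert t (PySem.Dict.ofList [("in", 0), ("out", 0)])) PySem.Dict.empty)
    (fun _ => (0, 0)) (pv_keys_build uts _)
    (fun x hx => by rw [pv_getD_build]; simp [hx]) t ht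
  rw [hA, pv_getD_build]
  simp [ht, PySem.List.count_eq]
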